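-- pv_equiv track=rewrite | github.com/JamesAsuraA93/CMU_Python | assignment#1/Third.py | calculate_p2p_evolve_exp
-- ===== SOURCE A (Python) =====
-- def calculate_p2p_evolve_exp(p,c):
--     evole = 0
--     for i in range(p):
--         if c-12>=0:
--             c -= 12
--             evole += 1
--             c+=1
--         else:
--             pass
--     return 500*evole
-- ===== SOURCE B (Python) =====
-- def calculate_p2p_evolve_exp(p, c):
--     steps = (c - 12) // 11 + 1 if c >= 12 else 0
--     return 500 * min(max(p, 0), steps)
-- ===== Notes on version B (the rewrite author's own statement) =====
-- stated objective: faster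
-- what changed: replaces the O(p) simulation loop (each iteration nets c -= 11 while c >= 12) by the closed form min(max(p,0), (c-12)//11 + 1 if c>=12 else 0) times 500
import Mathlib
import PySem

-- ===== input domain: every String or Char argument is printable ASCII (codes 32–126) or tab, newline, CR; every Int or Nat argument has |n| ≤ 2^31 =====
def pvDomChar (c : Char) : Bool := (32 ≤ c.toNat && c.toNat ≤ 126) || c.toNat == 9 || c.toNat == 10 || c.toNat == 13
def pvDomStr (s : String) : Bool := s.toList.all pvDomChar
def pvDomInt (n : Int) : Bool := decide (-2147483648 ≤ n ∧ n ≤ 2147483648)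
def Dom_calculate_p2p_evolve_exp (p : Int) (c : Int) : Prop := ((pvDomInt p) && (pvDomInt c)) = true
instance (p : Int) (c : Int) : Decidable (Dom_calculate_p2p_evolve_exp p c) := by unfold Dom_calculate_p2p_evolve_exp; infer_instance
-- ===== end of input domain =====

-- B replaces A's O(p) simulation loop by the O(1) closed form 500 * min(max(p,0), (c-12)//11 + 1 if c>=12 else 0); proved equal on all inputs (objective: faster, measured).


-- ===== PORT A =====
-- Port of A: fold over range(p) carrying (c, evole); each iteration with c-12 >= 0 does c -= 12; evole += 1; c += 1.
def calculate_p2p_evolve_exp (p : Int) (c : Int) : Int :=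
  let st := (PySem.List.pyRange 0 p 1).foldl
    (fun (s : Int × Int) _ => if s.1 - 12 ≥ 0 then (s.1 - 12 + 1, s.2 + 1) else s) (c, 0)
  500 * st.2

-- ===== PORT B =====
-- Port of B (closed form): 500 * min(max(p,0), (c-12)//11 + 1 if c >= 12 else 0).
def calculate_p2p_evolve_exp_alt (p : Int) (c : Int) : Int :=
  let steps : Int := if c ≥ 12 then PySem.Int.floordiv (c - 12) 11 + 1 else 0
  500 * min (max p 0) steps

-- ===== PRECONDITION & SPEC =====
def Spec_calculate_p2p_evolve_exp (p : Int) (c : Int) (out : Int) : Prop := out = calculate_p2p_evolve_exp_alt p c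
instance (p : Int) (c : Int) (out : Int) : Decidable (Spec_calculate_p2p_evolve_exp p c out) := by unfold Spec_calculate_p2p_evolve_exp; infer_instance

-- ===== CLAIM (what is proved, stated in full; the proofs are below) =====
def Claim_equal_calculate_p2p_evolve_exp : Prop := ∀ (p : Int) (c : Int), Dom_calculate_p2p_evolve_exp p c → Spec_calculate_p2p_evolve_exp p c (calculate_p2p_evolve_exp p c)

-- ===== LEMMAS AND PROOFS =====

-- ===== VERDICT (by name: the statement is the Claim_ definition above) =====
-- number of successful decrements when the loop runs n more times from counter c
def stepsFrom (c : Int) : Int := if c ≥ 12 then PySem.Int.floordiv (c - 12) 11 + 1 else 0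

theorem stepsFrom_succ (c : Int) (h : c ≥ 12) : stepsFrom c = stepsFrom (c - 11) + 1 := by
  unfold stepsFrom
  rw [PySem.Int.floordiv_eq_ediv_of_pos (by omega)]
  by_cases h2 : c - 11 ≥ 12
  · rw [if_pos h, if_pos h2, PySem.Int.floordiv_eq_ediv_of_pos (by omega)]
    omega
  · rw [if_pos h, if_neg h2]
    omega

theorem foldl_loop (l : List Int) (c e : Int) :
    (l.foldl (fun (s : Int × Int) _ => if s.1 - 12 ≥ 0 then (s.1 - 12 + 1, s.2 + 1) else s) (c, e)).2
      = e + min (l.length : Int) (stepsFrom c) := by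
  induction l generalizing c e with
  | nil =>
    simp only [List.foldl_nil, List.length_nil, Nat.cast_zero]
    have : stepsFrom c ≥ 0 := by
      unfold stepsFrom
      split_ifs with h
      · rw [PySem.Int.floordiv_eq_ediv_of_pos (by omega)]; omega
      · omega
    omega
  | cons x xs ih =>
    simp only [List.foldl_cons, List.length_cons]
    by_cases h : c - 12 ≥ 0
    · rw [if_pos h]
      rw [ih]
      rw [show c - 12 + 1 = c - 11 by ring, stepsFrom_succ c (by omega)]
      have : stepsFrom (c - 11) ≥ 0 := by
        unfold stepsFrom
        split_ifs with h2
        · rw [PySem.Int.floordiv_eq_ediv_of_pos (by omega)]; omega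
        · omega
      push_cast
      omega
    · rw [if_neg h]
      rw [ih]
      have hs : stepsFrom c = 0 := by unfold stepsFrom; rw [if_neg (by omega)]
      rw [hs]
      push_cast
      omega

theorem calculate_p2p_evolve_exp_spec : Claim_equal_calculate_p2p_evolve_exp := by
  intro p c _
  show (500 * ((PySem.List.pyRange 0 p 1).foldl
      (fun (s : Int × Int) _ => if s.1 - 12 ≥ 0 then (s.1 - 12 + 1, s.2 + 1) else s) (c, 0)).2)
    = 500 * min (max p 0) (if c ≥ 12 then PySem.Int.floordiv (c - 12) 11 + 1 else 0)
  rw [foldl_loop]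
  have hlen : ((PySem.List.pyRange 0 p 1).length : Int) = max p 0 := by
    rw [PySem.List.length_pyRange_one]
    omega
  rw [hlen]
  unfold stepsFrom
  ring
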